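-- pv_equiv track=rewrite | github.com/anmolagarwal999/Precog_Recruitment_Tasks | Task_3/part_2/convert.py | get_collection_name
-- ===== SOURCE A (Python) =====
-- def get_collection_name(path):
--     # slash_there=False
--     pos=-1
--     for i in range(0,len(path)):
--         if path[i]=='/':
--             pos=i
--     if pos==-1:
--         return path[:-4]
--     else:
--         return path[pos+1:-4]
-- ===== SOURCE B (Python) =====
-- def get_collection_name(path):
--     # single backward scan: collect the characters after the last '/' (early exit), then drop the extension
--     rev = []
--     for c in reversed(path):
--         if c == '/':
--             break
--         rev.append(c)
--     name = ''.join(reversed(rev))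
--     return name[:-4]
-- ===== Notes on version B (the rewrite author's own statement) =====
-- stated objective: alternative
-- what changed: B replaces A's full forward scan that tracks the last slash index plus index slicing by a single backward scan that collects the tail characters after the last slash with early exit, then drops the 4-char extension.
import Mathlib
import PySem

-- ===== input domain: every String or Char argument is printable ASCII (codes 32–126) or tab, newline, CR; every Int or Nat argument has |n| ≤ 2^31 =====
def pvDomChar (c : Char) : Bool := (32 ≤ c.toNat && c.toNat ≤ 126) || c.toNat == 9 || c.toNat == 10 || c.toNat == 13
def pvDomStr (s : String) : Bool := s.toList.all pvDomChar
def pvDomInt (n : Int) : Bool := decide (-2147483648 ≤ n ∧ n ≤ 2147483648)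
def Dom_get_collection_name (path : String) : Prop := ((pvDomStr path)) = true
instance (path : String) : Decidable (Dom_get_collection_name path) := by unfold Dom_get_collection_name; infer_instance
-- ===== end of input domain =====

-- B replaces A's full forward scan tracking the last-slash index by a single backward scan
-- collecting the tail after the last slash, then dropping the 4-character extension (alternative).

-- ===== PORT A =====
-- the 'for i in range(0, len(path)): if path[i]=='/': pos=i' loop of A
def pvPosFold (cs : List Char) : Int :=
  (PySem.List.pyRange 0 (cs.length : Int) 1).foldl
    (fun pos i => if PySem.List.pyGetD cs i ' ' = '/' then i else pos) (-1)

def get_collection_name (path : String) : String :=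
  let pos := pvPosFold path.toList
  if pos = -1 then PySem.Str.slice path none (some (-4))
  else PySem.Str.slice path (some (pos + 1)) (some (-4))

-- ===== PORT B =====
-- B's backward loop with break: collects chars of the reversed path up to the first slash
def pvTailRev : List Char → List Char
  | [] => []
  | c :: rest => if c = '/' then [] else c :: pvTailRev rest

def get_collection_name_alt (path : String) : String :=
  let name := String.ofList (pvTailRev path.toList.reverse).reverse
  PySem.Str.slice name none (some (-4))

-- ===== PRECONDITION & SPEC =====
def Spec_get_collection_name (path : String) (out : String) : Prop := out = get_collection_name_alt path
instance (path : String) (out : String) : Decidable (Spec_get_collection_name path out) := by unfold Spec_get_collection_name; infer_instance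

-- ===== CLAIM (what is proved, stated in full; the proofs are below) =====
def Claim_equal_get_collection_name : Prop := ∀ (path : String), Dom_get_collection_name path → Spec_get_collection_name path (get_collection_name path)

-- ===== LEMMAS AND PROOFS =====

-- one loop step of A, seen from the right end of the string
lemma pvPosFold_append (cs : List Char) (c : Char) :
    pvPosFold (cs ++ [c]) = if c = '/' then (cs.length : Int) else pvPosFold cs := by
  unfold pvPosFold
  have hlen : ((cs ++ [c]).length : Int) = (cs.length : Int) + 1 := by
    simp
  rw [hlen, PySem.List.pyRange_one_succ_right (by positivity), List.foldl_append]
  have hcong :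
      (PySem.List.pyRange 0 (cs.length : Int) 1).foldl
        (fun pos i => if PySem.List.pyGetD (cs ++ [c]) i ' ' = '/' then i else pos) (-1)
      = (PySem.List.pyRange 0 (cs.length : Int) 1).foldl
        (fun pos i => if PySem.List.pyGetD cs i ' ' = '/' then i else pos) (-1) := by
    apply PySem.List.foldl_congr_mem
    intro acc x hx
    have hx' := PySem.List.mem_pyRange_one.mp hx
    have h1 : x < (cs.length : Int) := hx'.2
    rw [PySem.List.pyGetD_eq_getElem (cs ++ [c]) ' ' hx'.1 (by simp; omega),
      PySem.List.pyGetD_eq_getElem cs ' ' hx'.1 h1]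
    rw [List.getElem_append_left (by omega)]
  rw [hcong]
  have hget : PySem.List.pyGetD (cs ++ [c]) (cs.length : Int) ' ' = c := by
    rw [PySem.List.pyGetD_eq_getElem (cs ++ [c]) ' ' (by positivity) (by simp)]
    simp
  simp only [List.foldl_cons, List.foldl_nil, hget]

-- the characterisation tying A's last-slash index to B's collected tail
lemma pvPosFold_spec (cs : List Char) :
    (pvPosFold cs = -1 ∧ (pvTailRev cs.reverse).reverse = cs)
  ∨ (∃ k : Nat, pvPosFold cs = (k : Int) ∧ k < cs.length ∧
      (pvTailRev cs.reverse).reverse = cs.drop (k + 1)) := by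
  induction cs using List.reverseRecOn with
  | nil =>
    left
    constructor
    · rfl
    · rfl
  | append_singleton cs c ih =>
    have hstep := pvPosFold_append cs c
    have htail : pvTailRev (cs ++ [c]).reverse
        = if c = '/' then [] else c :: pvTailRev cs.reverse := by
      rw [List.reverse_append]
      simp [pvTailRev]
    by_cases hc : c = '/'
    · right
      refine ⟨cs.length, ?_, by simp, ?_⟩
      · rw [hstep]; simp [hc]
      · rw [htail]
        simp [hc]
    · rw [htail]
      rcases ih with ⟨h1, h2⟩ | ⟨k, h1, h2, h3⟩
      · left
        constructor
        · rw [hstep, if_neg hc, h1]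
        · simp [hc, h2]
      · right
        refine ⟨k, ?_, by simp; omega, ?_⟩
        · rw [hstep, if_neg hc, h1]
        · rw [if_neg hc, List.reverse_cons, h3,
            List.drop_append_of_le_length (by omega)]

-- ===== VERDICT (by name: the statement is the Claim_ definition above) =====
theorem get_collection_name_spec : Claim_equal_get_collection_name := by
  unfold Claim_equal_get_collection_name Spec_get_collection_name
  intro path _
  unfold get_collection_name get_collection_name_alt
  simp only
  rcases pvPosFold_spec path.toList with ⟨h1, h2⟩ | ⟨k, h1, h2, h3⟩
  · rw [if_pos h1]
    unfold PySem.Str.slice PySem.Chars.slice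
    rw [String.toList_ofList, h2]
  · rw [h1, if_neg (by omega)]
    unfold PySem.Str.slice PySem.Chars.slice
    rw [String.toList_ofList, h3]
    congr 1
    unfold PySem.List.slice
    have hk1 : PySem.List.clampIdx path.toList.length ((k : Int) + 1) = k + 1 := by
      unfold PySem.List.clampIdx
      rw [if_neg (by omega)]
      omega
    have hneg : ∀ n : Nat, PySem.List.clampIdx n (-4) = n - 4 :=
      fun n => PySem.List.clampIdx_neg_ofNat n 4 (by omega)
    simp only [hk1, hneg, List.length_drop]
    rw [List.drop_drop]
    congr 1
    omega
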